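-- pv_equiv track=rewrite | github.com/fderoubaix/idfm-trains-ha | custom_components/idfm_trains/coordinator.py | _get_line_id
-- ===== SOURCE A (Python) =====
-- def _get_line_id(line_ref: str | None) -> str | None:
--     """Extract the line code from a STIF LineRef like 'STIF:Line::C01728:'."""
--     if not line_ref:
--         return None
--     parts = line_ref.split(":")
--     for part in reversed(parts):
--         if part.startswith("C") and len(part) > 1:
--             return part
--     return None
-- ===== SOURCE B (Python) =====
-- def _get_line_id(line_ref):
--     """Extract the line code from a STIF LineRef like 'STIF:Line::C01728:'."""
--     if not line_ref:
--         return None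
--     best = None
--     cur = []
--     for ch in line_ref + ":":
--         if ch == ":":
--             if len(cur) > 1 and cur[0] == "C":
--                 best = "".join(cur)
--             cur = []
--         else:
--             cur.append(ch)
--     return best
-- ===== Notes on version B (the rewrite author's own statement) =====
-- stated objective: alternative
-- what changed: Replaces split-then-reversed-scan with a single forward character pass that flushes colon-delimited segments and keeps the last segment that begins with the letter C and has length greater than one.
import Mathlib
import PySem

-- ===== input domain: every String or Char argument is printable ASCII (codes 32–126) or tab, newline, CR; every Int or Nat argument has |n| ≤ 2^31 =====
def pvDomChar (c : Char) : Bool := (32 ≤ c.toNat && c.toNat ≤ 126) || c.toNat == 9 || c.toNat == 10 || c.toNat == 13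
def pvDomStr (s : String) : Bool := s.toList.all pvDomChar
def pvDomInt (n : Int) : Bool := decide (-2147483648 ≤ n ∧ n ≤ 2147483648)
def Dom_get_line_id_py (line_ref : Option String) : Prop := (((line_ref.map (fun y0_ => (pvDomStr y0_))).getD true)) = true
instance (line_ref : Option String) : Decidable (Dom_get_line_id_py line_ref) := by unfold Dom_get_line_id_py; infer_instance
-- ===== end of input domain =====

-- B replaces A's split+reversed-scan by a single forward character pass keeping the last
-- qualifying colon-delimited segment (alternative decomposition; return value only, no mutation).

-- ===== PORT A =====
def get_line_id_py (line_ref : Option String) : Option String :=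
  match line_ref with
  | none => none
  | some s =>
    if s = "" then none
    else
      let parts := (PySem.Str.split? s ":").getD []
      parts.reverse.find? (fun part =>
        PySem.Str.startswith part "C" && decide (1 < PySem.Str.len part))

-- ===== PORT B =====
-- the flush test `len(cur) > 1 and cur[0] == "C"` of Source B
def altFlushOk (cur : List Char) : Bool := decide (1 < cur.length) && (cur.headD ' ' == 'C')

-- the `for ch in line_ref + ":"` loop of Source B, state = (cur, best)
def altLoop : List Char → List Char → Option (List Char) → Option (List Char)
  | [], _cur, best => best
  | c :: cs, cur, best =>
      if c == ':' then altLoop cs [] (if altFlushOk cur then some cur else best)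
      else altLoop cs (cur ++ [c]) best

def get_line_id_py_alt (line_ref : Option String) : Option String :=
  match line_ref with
  | none => none
  | some s =>
    if s = "" then none
    else (altLoop (s.toList ++ [':']) [] none).map String.ofList

-- ===== PRECONDITION & SPEC =====
def Spec_get_line_id_py (line_ref : Option String) (out : Option String) : Prop := out = get_line_id_py_alt line_ref
instance (line_ref : Option String) (out : Option String) : Decidable (Spec_get_line_id_py line_ref out) := by unfold Spec_get_line_id_py; infer_instance

-- ===== CLAIM (what is proved, stated in full; the proofs are below) =====
def Claim_equal_get_line_id_py : Prop := ∀ (line_ref : Option String), Dom_get_line_id_py line_ref → Spec_get_line_id_py line_ref (get_line_id_py line_ref)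

-- ===== LEMMAS AND PROOFS =====

-- the colon-segments of a character list (reference shape for both proofs)
def segs : List Char → List (List Char)
  | [] => [[]]
  | c :: cs => if c = ':' then [] :: segs cs else (segs cs).modifyHead (c :: ·)

theorem segs_ne_nil (cs : List Char) : segs cs ≠ [] := by
  induction cs with
  | nil => simp [segs]
  | cons c cs ih =>
    simp only [segs]
    split
    · simp
    · cases h : segs cs with
      | nil => exact absurd h ih
      | cons a t => simp [List.modifyHead]

theorem segs_no_colon (cur : List Char) (h : ':' ∉ cur) : segs cur = [cur] := by
  induction cur with
  | nil => rfl
  | cons c cs ih =>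
    simp only [List.mem_cons, not_or] at h
    simp [segs, Ne.symm h.1, ih h.2, List.modifyHead]

theorem segs_append_colon (cur rest : List Char) (h : ':' ∉ cur) :
    segs (cur ++ ':' :: rest) = cur :: segs rest := by
  induction cur with
  | nil => simp [segs]
  | cons c cs ih =>
    simp only [List.mem_cons, not_or] at h
    simp [segs, Ne.symm h.1, ih h.2, List.modifyHead]

theorem go_eq_segs (fuel : Nat) (l cur : List Char) (acc : List (List Char))
    (hf : l.length < fuel) :
    PySem.Chars.splitOn.go [':'] fuel l cur acc
      = acc.reverse ++ (segs l).modifyHead (cur.reverse ++ ·) := by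
  induction fuel generalizing l cur acc with
  | zero => omega
  | succ fuel ih =>
    cases l with
    | nil =>
      simp [PySem.Chars.splitOn.go, segs, List.modifyHead]
    | cons c rest =>
      by_cases hc : c = ':'
      · subst hc
        rw [PySem.Chars.splitOn.go]
        simp only [List.isPrefixOf, beq_self_eq_true, Bool.true_and, if_pos,
          List.length_cons, List.length_nil, List.drop_succ_cons, List.drop_zero]
        rw [ih rest [] (cur.reverse :: acc) (by simpa using Nat.lt_of_succ_lt_succ hf)]
        simp [segs, List.modifyHead]
        cases segs rest <;> rfl
      · rw [PySem.Chars.splitOn.go]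
        have hpre : [':'].isPrefixOf (c :: rest) = false := by
          simp [List.isPrefixOf, beq_iff_eq, Ne.symm hc]
        simp only [hpre, Bool.false_eq_true, if_neg, not_false_iff]
        rw [ih rest (c :: cur) acc (by simpa using Nat.lt_of_succ_lt_succ hf)]
        simp only [segs, hc, if_neg, List.reverse_cons]
        cases h : segs rest with
        | nil => exact absurd h (segs_ne_nil rest)
        | cons a t => simp [List.modifyHead]

theorem splitOn_eq_segs (cs : List Char) : PySem.Chars.splitOn cs [':'] = segs cs := by
  unfold PySem.Chars.splitOn
  rw [go_eq_segs (cs.length + 1) cs [] [] (by omega)]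
  cases h : segs cs with
  | nil => exact absurd h (segs_ne_nil cs)
  | cons a t => simp [List.modifyHead]

theorem altLoop_eq (cs : List Char) : ∀ (cur : List Char) (best : Option (List Char)),
    ':' ∉ cur →
    altLoop (cs ++ [':']) cur best
      = ((segs (cur ++ cs)).reverse.find? altFlushOk).or best := by
  induction cs with
  | nil =>
    intro cur best h
    simp only [List.nil_append, List.append_nil, altLoop, beq_self_eq_true, if_pos,
      segs_no_colon cur h, List.reverse_singleton]
    by_cases hok : altFlushOk cur = true <;> simp [List.find?, hok]
  | cons c cs ih =>
    intro cur best h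
    by_cases hc : c = ':'
    · subst hc
      simp only [List.cons_append, altLoop, beq_self_eq_true, if_pos]
      rw [ih [] _ (by simp)]
      rw [segs_append_colon cur cs h]
      simp only [List.reverse_cons, List.find?_append, List.nil_append]
      by_cases hok : altFlushOk cur = true <;>
        cases hfind : (segs cs).reverse.find? altFlushOk <;>
          simp [List.find?, hok, hfind, Option.or]
    · have hb : (c == ':') = false := by simp [beq_iff_eq, hc]
      simp only [List.cons_append, altLoop, hb, Bool.false_eq_true, if_neg, not_false_iff]
      rw [ih (cur ++ [c]) best (by simp [h, Ne.symm hc])]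
      simp [List.append_assoc]

theorem pred_eq (cs : List Char) :
    (PySem.Str.startswith (String.ofList cs) "C" && decide (1 < PySem.Str.len (String.ofList cs)))
      = altFlushOk cs := by
  cases cs with
  | nil => simp [PySem.Str.startswith_eq, PySem.Chars.startswith, PySem.Str.len_eq, altFlushOk,
      List.isPrefixOf]
  | cons c t =>
    have h1 : (String.ofList (c :: t)).toList = c :: t := by simp
    simp only [PySem.Str.startswith_eq, PySem.Str.len_eq, h1, altFlushOk,
      PySem.Chars.startswith, List.headD, List.length_cons]
    rw [Bool.and_comm]
    congr 1
    · rw [decide_eq_decide]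
      push_cast
      omega
    · simp [List.isPrefixOf, eq_comm]

-- ===== VERDICT (by name: the statement is the Claim_ definition above) =====
theorem get_line_id_py_spec : Claim_equal_get_line_id_py := by
  intro line_ref _
  unfold Spec_get_line_id_py get_line_id_py get_line_id_py_alt
  cases line_ref with
  | none => rfl
  | some s =>
    by_cases hs : s = ""
    · simp [hs]
    · simp only [hs, if_neg, not_false_iff]
      rw [altLoop_eq s.toList [] none (by simp)]
      simp only [List.nil_append, Option.or_none]
      unfold PySem.Str.split? PySem.Chars.split?
      rw [show (":" : String).toList = [':'] from rfl, splitOn_eq_segs]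
      simp only [List.isEmpty_cons, Bool.false_eq_true, if_false]
      simp only [Option.map_some, Option.getD_some, ← List.map_reverse, List.find?_map]
      rw [show ((fun part => PySem.Str.startswith part "C" && decide (1 < PySem.Str.len part)) ∘ String.ofList) = altFlushOk from funext pred_eq]
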